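-- pv_equiv track=rewrite | github.com/DanL0w/DofE | Codewars - LOWER NUMBER HARDER/4 - Snail.py | decodeletter
-- ===== SOURCE A (Python) =====
-- def decodeletter(character, i):
--     list = "abcdefghijklmnopqrstuvwxyzABCDEFGHIJKLMNOPQRSTUVWXYZ0123456789.,? "
--     if character in list:
--         reordlist = ""
--         powerOf2 = 2 ** i
--         for j in range(1, 67):
--             reordlist = reordlist + list[(powerOf2 * j)%67-1]
--         placeInList = reordlist.index(character)
--         character = list[placeInList]
--     return character
-- ===== SOURCE B (Python) =====
-- def decodeletter(character, i):
--     alphabet = "abcdefghijklmnopqrstuvwxyzABCDEFGHIJKLMNOPQRSTUVWXYZ0123456789.,? "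
--     if len(character) == 1 and character in alphabet:
--         p = alphabet.index(character)
--         inv = pow(2, (-i) % 66, 67)  # inverse of 2**i mod 67 (2 has order 66 mod 67)
--         character = alphabet[inv * (p + 1) % 67 - 1]
--     return character
-- ===== Notes on version B (the rewrite author's own statement) =====
-- stated objective: simpler
-- what changed: Instead of building the 66-character permuted alphabet and scanning it with .index, B decodes directly with modular arithmetic: the inverse of 2**i mod 67 is pow(2, (-i) % 66, 67) (2 has order 66 mod 67) and the answer is the alphabet character at inv*(p+1) % 67 - 1.
-- outside the precondition, e.g. on decodeletter('', 0): A returns 'a', B returns ''; on decodeletter('ab', 0): A returns 'a', B returns 'ab'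
import Mathlib
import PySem

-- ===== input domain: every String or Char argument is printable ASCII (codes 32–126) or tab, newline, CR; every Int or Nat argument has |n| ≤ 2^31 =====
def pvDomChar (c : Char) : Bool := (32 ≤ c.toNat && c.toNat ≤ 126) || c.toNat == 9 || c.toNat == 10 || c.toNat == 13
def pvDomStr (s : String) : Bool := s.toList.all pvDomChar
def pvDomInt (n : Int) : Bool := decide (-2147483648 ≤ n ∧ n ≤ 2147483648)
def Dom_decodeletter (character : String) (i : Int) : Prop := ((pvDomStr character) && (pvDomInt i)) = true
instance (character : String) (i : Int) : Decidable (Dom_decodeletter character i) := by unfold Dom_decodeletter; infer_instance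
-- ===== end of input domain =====

-- B replaces A's per-call construction of the 66-character permuted alphabet (plus the full
-- bignum 2**i and an .index scan) by a direct modular-arithmetic formula using the inverse of
-- 2**i mod 67; objective: simpler.


-- the 66-character alphabet literal both Pythons carry
def pvAlpha : List Char :=
  "abcdefghijklmnopqrstuvwxyzABCDEFGHIJKLMNOPQRSTUVWXYZ0123456789.,? ".toList

-- ===== PORT A =====
-- 2 ** i is ported as 2 ^ i.toNat — exact for i ≥ 0; for i < 0 Python makes a float and the
-- subscript raises TypeError (excluded by Pre_). list[...] out of range (IndexError) and
-- .index not found (ValueError) are the Option-none / find = -1 cases, likewise excluded by Pre_.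
def decodeletter (character : String) (i : Int) : String :=
  if PySem.Chars.isIn character.toList pvAlpha then
    let powerOf2 : Int := 2 ^ i.toNat
    let reordlist : List Char :=
      (PySem.List.pyRange 1 67 1).foldl
        (fun acc j =>
          acc ++ ((PySem.List.pyGet? pvAlpha (PySem.Int.mod (powerOf2 * j) 67 - 1)).elim [] (fun c => [c])))
        []
    let placeInList : Int := PySem.Chars.find reordlist character.toList
    String.ofList ((PySem.List.pyGet? pvAlpha placeInList).elim [] (fun c => [c]))
  else character

-- ===== PORT B =====
-- pow(2, (-i) % 66, 67) is ported as 2 ^ ((-i) % 66).toNat % 67 (exponent ≤ 65, exact);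
-- alphabet.index(character) for the guarded single character is PySem.Chars.find.
def decodeletter_alt (character : String) (i : Int) : String :=
  if character.toList.length == 1 && PySem.Chars.isIn character.toList pvAlpha then
    let p : Int := PySem.Chars.find pvAlpha character.toList
    let inv : Int := 2 ^ (PySem.Int.mod (-i) 66).toNat % 67
    String.ofList ((PySem.List.pyGet? pvAlpha (PySem.Int.mod (inv * (p + 1)) 67 - 1)).elim [] (fun c => [c]))
  else character

-- ===== PRECONDITION & SPEC =====
-- Pre_ excludes (a) strings that are substrings of the alphabet without being a single character
-- (the empty string, "ab", …), on which A's substring `in`/.index behaviour is accidental —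
-- A raises ValueError for most i and returns an accidental character otherwise — and
-- (b) single alphabet characters with negative i, on which A raises TypeError (float index).
def Pre_decodeletter (character : String) (i : Int) : Prop :=
  PySem.Chars.isIn character.toList pvAlpha = true → (character.toList.length = 1 ∧ 0 ≤ i)
instance (character : String) (i : Int) : Decidable (Pre_decodeletter character i) := by
  unfold Pre_decodeletter; infer_instance

def pvWitness_decodeletter : String × Int := ("a", 3)

def Spec_decodeletter (character : String) (i : Int) (out : String) : Prop := out = decodeletter_alt character i
instance (character : String) (i : Int) (out : String) : Decidable (Spec_decodeletter character i out) := by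
  unfold Spec_decodeletter; infer_instance

-- ===== CLAIM (what is proved, stated in full; the proofs are below) =====
def Claim_equal_decodeletter : Prop := ∀ (character : String) (i : Int), Dom_decodeletter character i → Pre_decodeletter character i → Spec_decodeletter character i (decodeletter character i)

-- ===== LEMMAS AND PROOFS =====

theorem pvMod67 (a : Int) : PySem.Int.mod a 67 = a % 67 := by
  simp [PySem.Int.mod, Int.fmod_eq_emod]

theorem pvMod66 (a : Int) : PySem.Int.mod a 66 = a % 66 := by
  simp [PySem.Int.mod, Int.fmod_eq_emod]

theorem pvPrime67 : Prime (67 : Int) := by norm_num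

theorem pvNotDvdPow (n : Nat) : ¬ (67 : Int) ∣ 2 ^ n := by
  intro h
  have := pvPrime67.dvd_of_dvd_pow h
  norm_num at this

theorem pvPowDvd (m : Nat) (h : 66 ∣ m) : (2 : Int) ^ m % 67 = 1 := by
  obtain ⟨k, rfl⟩ := h
  have h0 : ((2 : Int) ^ 66) ≡ 1 [ZMOD 67] := by decide
  have h1 := h0.pow k
  rw [one_pow] at h1
  rw [pow_mul]
  simpa using h1

theorem pvAlpha_nodup : pvAlpha.Nodup := by decide

theorem pvAlpha_len : pvAlpha.length = 66 := by decide

theorem pvGetSome (xs : List Char) (m : Int) (h0 : 0 ≤ m) (h1 : m < xs.length) :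
    PySem.List.pyGet? xs m = some (PySem.List.pyGetD xs m ' ') := by
  obtain ⟨t, rfl⟩ : ∃ t : Nat, m = ↑t := ⟨m.toNat, (Int.toNat_of_nonneg h0).symm⟩
  rw [PySem.List.pyGet?_natCast, PySem.List.pyGetD_natCast]
  have ht : t < xs.length := by exact_mod_cast h1
  rw [List.getElem?_eq_getElem ht, List.getD_eq_getElem xs ' ' ht]

theorem pvSingletonPrefix (c : Char) (xs : List Char) : [c] <+: xs ↔ xs.head? = some c := by
  cases xs with
  | nil => simp
  | cons x t => simp [List.cons_prefix_cons, eq_comm]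

theorem pvFindEq (l : List Char) (c : Char) (k0 : Nat)
    (hG : l[k0]? = some c) (hmin : ∀ k, k < k0 → l[k]? ≠ some c) :
    PySem.Chars.find l [c] = ↑k0 := by
  have hmem : c ∈ l := List.mem_of_getElem? hG
  obtain ⟨s, t, hst⟩ := List.append_of_mem hmem
  have hinf : [c] <:+: l := ⟨s, t, by simpa using hst.symm⟩
  have h0 : 0 ≤ PySem.Chars.find l [c] := (PySem.Chars.find_nonneg_iff _ _).mpr hinf
  obtain ⟨hpre, hmin'⟩ := PySem.Chars.find_spec h0
  have ht : l[(PySem.Chars.find l [c]).toNat]? = some c := by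
    rw [← List.head?_drop]
    exact ((pvSingletonPrefix c _).mp hpre)
  have h1 : ¬ (PySem.Chars.find l [c]).toNat < k0 := fun h => hmin _ h ht
  have h2 : ¬ k0 < (PySem.Chars.find l [c]).toNat := by
    intro h
    exact hmin' k0 h ((pvSingletonPrefix c _).mpr (by rw [List.head?_drop]; exact hG))
  have : (PySem.Chars.find l [c]).toNat = k0 := by omega
  omega

theorem pvRangeEq : PySem.List.pyRange 1 67 1 = (List.range 66).map (fun k : Nat => (k : Int) + 1) := by
  decide

def pvGj (a j : Int) : Char :=
  PySem.List.pyGetD pvAlpha (PySem.Int.mod (a * j) 67 - 1) ' '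

def pvG (a : Int) (k : Nat) : Char := pvGj a ((k : Int) + 1)

theorem pvIdxBounds (a : Int) (hnd : ¬ (67 : Int) ∣ a) (j : Int) (hj1 : 1 ≤ j) (hj2 : j ≤ 66) :
    0 ≤ PySem.Int.mod (a * j) 67 - 1 ∧ PySem.Int.mod (a * j) 67 - 1 < 66 := by
  rw [pvMod67]
  have hnz : (a * j) % 67 ≠ 0 := by
    intro h
    have hd : (67 : Int) ∣ a * j := Int.dvd_of_emod_eq_zero h
    rcases (pvPrime67.dvd_mul).mp hd with h' | h'
    · exact hnd h'
    · omega
  have := Int.emod_nonneg (a * j) (by norm_num : (67:Int) ≠ 0)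
  have := Int.emod_lt_of_pos (a * j) (by norm_num : (0:Int) < 67)
  omega

theorem pvReordEq (a : Int) (hnd : ¬ (67 : Int) ∣ a) :
    (PySem.List.pyRange 1 67 1).foldl
      (fun acc j =>
        acc ++ ((PySem.List.pyGet? pvAlpha (PySem.Int.mod (a * j) 67 - 1)).elim [] (fun c => [c])))
      []
    = (List.range 66).map (pvG a) := by
  rw [PySem.List.foldl_congr_mem _ _
    (fun (acc : List Char) (j : Int) => acc ++ [pvGj a j]) _ ?_]
  · rw [PySem.List.foldl_append_singleton_eq_map, pvRangeEq, List.map_map]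
    rfl
  · intro acc j hj
    rw [pvRangeEq] at hj
    simp only [List.mem_map, List.mem_range] at hj
    obtain ⟨k, hk66, rfl⟩ := hj
    obtain ⟨hb0, hb1⟩ := pvIdxBounds a hnd ((k : Int) + 1) (by omega) (by omega)
    rw [pvGetSome pvAlpha _ hb0 (by rw [pvAlpha_len]; exact_mod_cast hb1)]
    rfl

-- ===== VERDICT (by name: the statement is the Claim_ definition above) =====
theorem decodeletter_spec : Claim_equal_decodeletter := by
  intro character i _ hpre
  unfold Spec_decodeletter
  by_cases h : PySem.Chars.isIn character.toList pvAlpha = true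
  · obtain ⟨hlen, hi⟩ := hpre h
    obtain ⟨c, hc⟩ : ∃ c, character.toList = [c] := by
      cases hl : character.toList with
      | nil => rw [hl] at hlen; simp at hlen
      | cons a t => cases t with
        | nil => exact ⟨a, rfl⟩
        | cons b u => rw [hl] at hlen; simp at hlen
    rw [hc] at h
    have hchar : character = String.ofList [c] := by
      rw [← hc]; exact String.ofList_toList.symm
    subst hchar
    obtain ⟨n, rfl⟩ : ∃ n : Nat, i = ↑n := ⟨i.toNat, (Int.toNat_of_nonneg hi).symm⟩
    -- abbreviations
    set a : Int := 2 ^ n with ha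
    have hnd : ¬ (67 : Int) ∣ a := pvNotDvdPow n
    -- position of c in the alphabet (B's p)
    have hmem : c ∈ pvAlpha := by
      rw [PySem.Chars.isIn_iff_infix] at h
      exact h.subset (List.mem_singleton_self c)
    obtain ⟨p, hp, hpc⟩ := List.mem_iff_getElem.mp hmem
    rw [pvAlpha_len] at hp
    have hpfind : PySem.Chars.find pvAlpha [c] = ↑p := by
      apply pvFindEq
      · rw [List.getElem?_eq_getElem (by rw [pvAlpha_len]; exact hp)]; exact congrArg some hpc
      · intro k hk hkc
        have hk66 : k < pvAlpha.length := by rw [pvAlpha_len]; omega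
        rw [List.getElem?_eq_getElem hk66] at hkc
        have : k = p := by
          have := (pvAlpha_nodup.getElem_inj_iff (hi := hk66) (hj := by rw [pvAlpha_len]; exact hp)).mp
            (by rw [hpc]; exact Option.some_injective _ hkc)
          exact this
        omega
    -- B's modular inverse
    set e : Nat := (PySem.Int.mod (-(n : Int)) 66).toNat with he
    set inv : Int := 2 ^ e % 67 with hinvdef
    have hdvd : (66 : Nat) ∣ e + n := by
      have h1 : (e : Int) = (-(n : Int)) % 66 := by
        rw [he, pvMod66, Int.toNat_of_nonneg (Int.emod_nonneg _ (by norm_num))]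
      have : (66 : Int) ∣ (e : Int) + n := by omega
      exact_mod_cast this
    have hinv : (inv * a) % 67 = 1 := by
      rw [hinvdef, ha, Int.mul_emod, Int.emod_emod_of_dvd _ dvd_rfl, ← Int.mul_emod, ← pow_add]
      exact pvPowDvd (e + n) hdvd
    -- B's index
    set j0 : Int := (inv * ((p : Int) + 1)) % 67 with hj0
    have hj0b : 1 ≤ j0 ∧ j0 ≤ 66 := by
      have h1 := Int.emod_nonneg (inv * ((p : Int) + 1)) (by norm_num : (67:Int) ≠ 0)
      have h2 := Int.emod_lt_of_pos (inv * ((p : Int) + 1)) (by norm_num : (0:Int) < 67)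
      have hnz : j0 ≠ 0 := by
        intro h0
        have hd : (67 : Int) ∣ inv * ((p : Int) + 1) := Int.dvd_of_emod_eq_zero (by rw [← hj0]; exact h0)
        rcases (pvPrime67.dvd_mul).mp hd with h' | h'
        · have : (inv * a) % 67 = 0 := Int.emod_eq_zero_of_dvd (h'.mul_right a)
          rw [hinv] at this; norm_num at this
        · omega
      omega
    have hj0a : (a * j0) % 67 = (p : Int) + 1 := by
      rw [hj0, Int.mul_emod, Int.emod_emod_of_dvd _ dvd_rfl, ← Int.mul_emod, ← mul_assoc,
        Int.mul_emod, (by rw [mul_comm]; exact hinv : (a * inv) % 67 = 1)]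
      have : ((p : Int) + 1) % 67 = (p : Int) + 1 := Int.emod_eq_of_lt (by omega) (by omega)
      rw [this]
      norm_num [this]
    set k0 : Nat := j0.toNat - 1 with hk0
    have hj0k : j0 = (k0 : Int) + 1 := by omega
    have hk0lt : k0 < 66 := by omega
    -- the value at k0 in the permuted alphabet is c
    have hGk0 : pvG a k0 = c := by
      rw [pvG, ← hj0k, pvGj, pvMod67, hj0a]
      have : ((p : Int) + 1 - 1) = ((p : Nat) : Int) := by omega
      rw [this, PySem.List.pyGetD_natCast, List.getD_eq_getElem pvAlpha ' ' (by rw [pvAlpha_len]; exact hp)]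
      exact hpc
    -- and no earlier position holds c
    have hGmin : ∀ k, k < k0 → pvG a k ≠ c := by
      intro k hk hGc
      have hk66 : k < 66 := by omega
      obtain ⟨hb0, hb1⟩ := pvIdxBounds a hnd ((k : Int) + 1) (by omega) (by omega)
      rw [pvG, pvGj] at hGc
      set m : Int := PySem.Int.mod (a * ((k : Int) + 1)) 67 - 1 with hm
      obtain ⟨t, htm⟩ : ∃ t : Nat, m = ↑t := ⟨m.toNat, (Int.toNat_of_nonneg hb0).symm⟩
      have ht66 : t < 66 := by omega
      rw [htm, PySem.List.pyGetD_natCast,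
        List.getD_eq_getElem pvAlpha ' ' (by rw [pvAlpha_len]; omega)] at hGc
      have htp : t = p := by
        exact (pvAlpha_nodup.getElem_inj_iff (hi := by rw [pvAlpha_len]; omega)
          (hj := by rw [pvAlpha_len]; exact hp)).mp (by rw [hGc, hpc])
      -- so (a * (k+1)) % 67 = p + 1 = (a * j0) % 67, hence 67 ∣ (k+1) - j0
      have h1 : (a * ((k : Int) + 1)) % 67 = (p : Int) + 1 := by
        rw [pvMod67] at hm
        omega
      have hd : (67 : Int) ∣ a * (((k : Int) + 1) - j0) := by
        have : a * (((k : Int) + 1) - j0) = a * ((k : Int) + 1) - a * j0 := by ring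
        rw [this]
        omega
      rcases (pvPrime67.dvd_mul).mp hd with h' | h'
      · exact hnd h'
      · omega
    -- evaluate both ports
    simp only [decodeletter, decodeletter_alt, String.toList_ofList, Int.toNat_natCast,
      List.length_cons, List.length_nil, h, if_true, Bool.and_eq_true, beq_iff_eq]
    rw [if_pos (by trivial : True ∧ True)]
    rw [← ha, pvReordEq a hnd, hpfind,
      pvFindEq ((List.range 66).map (pvG a)) c k0
        (by rw [List.getElem?_map, List.getElem?_range hk0lt]; exact congrArg some hGk0)
        (by intro k hk hkc
            have hk66 : k < 66 := by omega
            rw [List.getElem?_map, List.getElem?_range hk66] at hkc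
            exact hGmin k hk (Option.some_injective _ hkc))]
    have hBidx : PySem.Int.mod (2 ^ (PySem.Int.mod (-(n : Int)) 66).toNat % 67 * ((p : Int) + 1)) 67 - 1
        = (k0 : Int) := by
      rw [pvMod67, ← he, ← hinvdef, ← hj0]
      omega
    rw [hBidx]
  · have hb : PySem.Chars.isIn character.toList pvAlpha = false := by
      revert h; cases PySem.Chars.isIn character.toList pvAlpha <;> simp
    simp [decodeletter, decodeletter_alt, hb]
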